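-- pv_equiv track=rewrite | github.com/agh-bit-academy/SummerProject2022 | WDI/Zestaw_3/Zadanie_12/prog.py | f
-- ===== SOURCE A (Python) =====
-- def f(A):
--     maxAscendingLen = 0
--     maxDescendingLen = 0
--     i = 1
--     while i < len(A):
--         ascLen = 1
--         descLen = 1
--         r = A[i] - A[i - 1]
--         if r > 0:
--             while i < len(A) and A[i] - A[i - 1] == r:
--                 ascLen += 1
--                 i += 1
--             maxAscendingLen = max(ascLen, maxAscendingLen)
--         elif r < 0:
--             while i < len(A) and A[i] - A[i - 1] == r:
--                 descLen += 1
--                 i += 1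
--             maxDescendingLen = max(descLen, maxDescendingLen)
--         else:
--             i += 1
--     return maxAscendingLen - maxDescendingLen
-- ===== SOURCE B (Python) =====
-- def f(A):
--     # pipeline: materialize the consecutive-difference array, group it into
--     # (value, run-length) pairs, then summarize the groups.
--     d = [y - x for x, y in zip(A, A[1:])]
--     runs = []
--     for v in d:
--         if runs and runs[-1][0] == v:
--             runs[-1] = (v, runs[-1][1] + 1)
--         else:
--             runs.append((v, 1))
--     maxAsc = 0
--     maxDesc = 0
--     for v, m in runs:
--         if v > 0:
--             maxAsc = max(maxAsc, m + 1)
--         elif v < 0: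
--             maxDesc = max(maxDesc, m + 1)
--     return maxAsc - maxDesc
-- ===== Notes on version B (the rewrite author's own statement) =====
-- stated objective: idiomatic
-- what changed: Replaces A's interleaved nested while-loops sharing one index with a three-stage pipeline (materialize the consecutive-difference array via zip, group it into (value, run-length) pairs, then take the maxima over the groups); the zip comprehension replaces per-element interpreted index arithmetic, a constant-factor win.
import Mathlib
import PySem

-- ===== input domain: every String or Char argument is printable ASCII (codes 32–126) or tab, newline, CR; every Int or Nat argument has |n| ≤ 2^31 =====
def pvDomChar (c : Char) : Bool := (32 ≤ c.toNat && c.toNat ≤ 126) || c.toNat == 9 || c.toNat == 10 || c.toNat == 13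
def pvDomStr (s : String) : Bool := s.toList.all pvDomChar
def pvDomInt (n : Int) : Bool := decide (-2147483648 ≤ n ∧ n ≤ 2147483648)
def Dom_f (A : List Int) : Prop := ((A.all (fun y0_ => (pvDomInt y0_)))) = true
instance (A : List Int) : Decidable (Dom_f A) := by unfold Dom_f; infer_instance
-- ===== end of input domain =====

-- B replaces A's interleaved nested while-loops (one shared index) by a pipeline:
-- difference array -> run-length groups -> maxima over the groups (idiomatic; same O(n) cost).

-- ===== PORT A =====
-- Inner 'while i < len(A) and A[i] - A[i-1] == r' loop; state (cnt, i); returns (cnt, i).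
-- fuel only makes the recursion structural: it is started at A.length - i, which the
-- loop can never exhaust before its own condition fails.
-- Indices are always in range here (1 <= i), so A[i] is ported as getD (no IndexError possible).
def fInner (A : List Int) (r : Int) (fuel i : Nat) (cnt : Int) : Int × Nat :=
  match fuel with
  | 0 => (cnt, i)
  | fuel + 1 =>
    if i < A.length ∧ A.getD i 0 - A.getD (i - 1) 0 = r then
      fInner A r fuel (i + 1) (cnt + 1)
    else (cnt, i)

-- outer 'while i < len(A)' loop (fuel likewise starts at A.length and never runs out
-- before the condition fails); r is recomputed at each use, as in the source
def fOuter (A : List Int) (fuel i : Nat) (maxA maxD : Int) : Int :=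
  match fuel with
  | 0 => maxA - maxD
  | fuel + 1 =>
    if i < A.length then
      if A.getD i 0 - A.getD (i - 1) 0 > 0 then
        fOuter A fuel (fInner A (A.getD i 0 - A.getD (i - 1) 0) (A.length - i) i 1).2
          (max (fInner A (A.getD i 0 - A.getD (i - 1) 0) (A.length - i) i 1).1 maxA) maxD
      else if A.getD i 0 - A.getD (i - 1) 0 < 0 then
        fOuter A fuel (fInner A (A.getD i 0 - A.getD (i - 1) 0) (A.length - i) i 1).2
          maxA (max (fInner A (A.getD i 0 - A.getD (i - 1) 0) (A.length - i) i 1).1 maxD)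
      else
        fOuter A fuel (i + 1) maxA maxD
    else maxA - maxD

def f (A : List Int) : Int := fOuter A A.length 1 0 0

-- ===== PORT B =====
-- one grouping step: extend the last open run or open a new one
def fAltGroupStep (runs : List (Int × Int)) (v : Int) : List (Int × Int) :=
  match runs.getLast? with
  | some (w, m) => if w == v then runs.dropLast ++ [(v, m + 1)] else runs ++ [(v, 1)]
  | none => runs ++ [(v, 1)]

-- one summarizing step over a (value, run-length) group; state (maxAsc, maxDesc)
def fAltMaxStep (p : Int × Int) (r : Int × Int) : Int × Int :=
  if r.1 > 0 then (max p.1 (r.2 + 1), p.2)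
  else if r.1 < 0 then (p.1, max p.2 (r.2 + 1))
  else p

def f_alt (A : List Int) : Int :=
  let d := List.zipWith (fun x y => y - x) A (A.drop 1)
  let runs := d.foldl fAltGroupStep []
  let p := runs.foldl fAltMaxStep (0, 0)
  p.1 - p.2

-- ===== PRECONDITION & SPEC =====
def Spec_f (A : List Int) (out : Int) : Prop := out = f_alt A
instance (A : List Int) (out : Int) : Decidable (Spec_f A out) := by unfold Spec_f; infer_instance

-- ===== CLAIM (what is proved, stated in full; the proofs are below) =====
def Claim_equal_f : Prop := ∀ (A : List Int), Dom_f A → Spec_f A (f A)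

-- ===== LEMMAS AND PROOFS =====
def pvDiffs (A : List Int) : List Int := List.zipWith (fun x y => y - x) A (A.drop 1)

-- length of the leading run of r
def pvTW (r : Int) : List Int → Nat
  | [] => 0
  | v :: t => if v = r then pvTW r t + 1 else 0

def pvConsume (w m : Int) : List Int → List (Int × Int)
  | [] => [(w, m)]
  | v :: t => if v = w then pvConsume w (m + 1) t else (w, m) :: pvConsume v 1 t

def pvGroups : List Int → List (Int × Int)
  | [] => []
  | v :: t => pvConsume v 1 t

-- run-by-run reference computation over the difference list
def pvSpec : List Int → Int → Int → Int
  | [], a, b => a - b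
  | v :: t, a, b =>
    if v > 0 then pvSpec (t.drop (pvTW v t)) (max ((pvTW v t : Int) + 2) a) b
    else if v < 0 then pvSpec (t.drop (pvTW v t)) a (max ((pvTW v t : Int) + 2) b)
    else pvSpec t a b
termination_by d _ _ => d.length
decreasing_by
  all_goals simp

theorem pvDiffs_length (A : List Int) : (pvDiffs A).length = A.length - 1 := by
  simp [pvDiffs]

theorem diff_nil (A : List Int) (j : Nat) (h : A.length ≤ j + 1) :
    (pvDiffs A).drop j = [] := by
  apply List.drop_eq_nil_of_le
  rw [pvDiffs_length]; omega

theorem diff_cons (A : List Int) (j : Nat) (h : j + 1 < A.length) :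
    (pvDiffs A).drop j = (A.getD (j + 1) 0 - A.getD j 0) :: (pvDiffs A).drop (j + 1) := by
  have hj : j < (pvDiffs A).length := by rw [pvDiffs_length]; omega
  rw [List.drop_eq_getElem_cons hj]
  congr 1
  simp [pvDiffs, h, Nat.lt_of_succ_lt h]

theorem inner_eq (A : List Int) (r : Int) :
    ∀ (fuel j : Nat) (cnt : Int), A.length ≤ (j + 1) + fuel →
    fInner A r fuel (j + 1) cnt =
      (cnt + (pvTW r ((pvDiffs A).drop j) : Int), (j + 1) + pvTW r ((pvDiffs A).drop j)) := by
  intro fuel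
  induction fuel with
  | zero =>
    intro j cnt hf
    rw [diff_nil A j (by omega)]
    simp [fInner, pvTW]
  | succ fuel ih =>
    intro j cnt hf
    by_cases hj : j + 1 < A.length
    · rw [diff_cons A j hj]
      by_cases hr : A.getD (j + 1) 0 - A.getD j 0 = r
      · rw [hr]
        rw [show pvTW r (r :: (pvDiffs A).drop (j + 1)) = pvTW r ((pvDiffs A).drop (j + 1)) + 1
          from by simp [pvTW]]
        rw [fInner, if_pos (by simpa using ⟨hj, hr⟩)]
        rw [ih (j + 1) (cnt + 1) (by omega)]
        simp only [Prod.mk.injEq]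
        constructor
        · push_cast; ring
        · omega
      · rw [show pvTW r ((A.getD (j + 1) 0 - A.getD j 0) :: (pvDiffs A).drop (j + 1)) = 0
          from by simp only [pvTW, if_neg hr]]
        rw [fInner, if_neg (by simp; intro _; simpa using hr)]
        simp
    · rw [diff_nil A j (by omega)]
      rw [fInner, if_neg (by simp; omega)]
      simp [pvTW]

theorem outer_spec (A : List Int) :
    ∀ (fuel j : Nat) (a b : Int), A.length ≤ (j + 1) + fuel →
    fOuter A fuel (j + 1) a b = pvSpec ((pvDiffs A).drop j) a b := by
  intro fuel
  induction fuel with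
  | zero =>
    intro j a b hf
    rw [diff_nil A j (by omega), pvSpec]
    rfl
  | succ fuel ih =>
    intro j a b hf
    by_cases hj : j + 1 < A.length
    · have hd := diff_cons A j hj
      set r := A.getD (j + 1) 0 - A.getD j 0 with hrdef
      set t := (pvDiffs A).drop (j + 1) with htdef
      set tw := pvTW r t with htwdef
      have hsimp : (j + 1 : Nat) - 1 = j := by omega
      have htw : pvTW r ((pvDiffs A).drop j) = tw + 1 := by
        rw [hd]; simp [pvTW, htwdef]
      have hdrop : t.drop tw = (pvDiffs A).drop (j + 1 + tw) := by
        rw [htdef, List.drop_drop]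
      have hcast : (1 : Int) + ((tw + 1 : Nat) : Int) = (tw : Int) + 2 := by
        push_cast; ring
      have hinner := inner_eq A r (A.length - (j + 1)) j 1 (by omega)
      rcases lt_trichotomy r 0 with hr | hr | hr
      · -- descending run
        rw [fOuter, if_pos hj, hsimp, if_neg (by omega), if_pos hr]
        rw [hinner]
        dsimp only
        rw [htw, hcast]
        rw [show j + 1 + (tw + 1) = (j + 1 + tw) + 1 from by omega]
        rw [ih (j + 1 + tw) _ _ (by omega)]
        rw [hd, pvSpec, if_neg (by omega), if_pos hr, ← htwdef, ← hdrop]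
      · -- zero difference
        rw [fOuter, if_pos hj, hsimp, if_neg (by omega), if_neg (by omega)]
        rw [ih (j + 1) a b (by omega)]
        rw [hd, pvSpec, if_neg (by omega), if_neg (by omega), ← htdef]
      · -- ascending run
        rw [fOuter, if_pos hj, hsimp, if_pos hr]
        rw [hinner]
        dsimp only
        rw [htw, hcast]
        rw [show j + 1 + (tw + 1) = (j + 1 + tw) + 1 from by omega]
        rw [ih (j + 1 + tw) _ _ (by omega)]
        rw [hd, pvSpec, if_pos hr, ← htwdef, ← hdrop]
    · rw [fOuter, if_neg (by omega)]
      rw [diff_nil A j (by omega), pvSpec]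

theorem consume_eq (t : List Int) : ∀ (w m : Int),
    pvConsume w m t = (w, m + (pvTW w t : Int)) :: pvGroups (t.drop (pvTW w t)) := by
  induction t with
  | nil => intro w m; simp [pvConsume, pvTW, pvGroups]
  | cons v t ih =>
    intro w m
    by_cases hv : v = w
    · rw [pvConsume, if_pos hv, ih w (m + 1)]
      rw [show pvTW w (v :: t) = pvTW w t + 1 from by simp [pvTW, hv]]
      rw [List.drop_succ_cons]
      refine congrArg₂ List.cons ?_ rfl
      refine congrArg (Prod.mk w) ?_
      push_cast; ring
    · rw [pvConsume, if_neg hv]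
      simp [pvTW, hv, pvGroups]

theorem foldl_group (d : List Int) : ∀ (gs : List (Int × Int)) (w m : Int),
    List.foldl fAltGroupStep (gs ++ [(w, m)]) d = gs ++ pvConsume w m d := by
  induction d with
  | nil => intro gs w m; simp [pvConsume]
  | cons v t ih =>
    intro gs w m
    rw [List.foldl_cons]
    by_cases hv : w = v
    · have : fAltGroupStep (gs ++ [(w, m)]) v = gs ++ [(v, m + 1)] := by
        simp [fAltGroupStep, hv]
      rw [this, ih gs v (m + 1), pvConsume, if_pos hv.symm, hv]
    · have : fAltGroupStep (gs ++ [(w, m)]) v = (gs ++ [(w, m)]) ++ [(v, 1)] := by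
        simp [fAltGroupStep, hv]
      rw [this, ih (gs ++ [(w, m)]) v 1, pvConsume, if_neg (fun h => hv h.symm)]
      simp

theorem foldl_groups (d : List Int) :
    List.foldl fAltGroupStep [] d = pvGroups d := by
  cases d with
  | nil => rfl
  | cons v t =>
    rw [List.foldl_cons]
    have : fAltGroupStep [] v = [] ++ [(v, 1)] := by simp [fAltGroupStep]
    rw [this, foldl_group t [] v 1]
    simp [pvGroups]

theorem fold_groups_zero (t : List Int) (a b : Int) :
    List.foldl fAltMaxStep (a, b) (pvGroups (0 :: t))
      = List.foldl fAltMaxStep (a, b) (pvGroups t) := by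
  have hz : ∀ (m : Int), fAltMaxStep (a, b) ((0 : Int), m) = (a, b) := by
    intro m; simp [fAltMaxStep]
  cases t with
  | nil => simp [pvGroups, pvConsume, hz]
  | cons u s =>
    by_cases hu : u = 0
    · subst hu
      show List.foldl fAltMaxStep (a, b) (pvConsume 0 1 (0 :: s)) = _
      rw [pvConsume, if_pos rfl, consume_eq]
      show _ = List.foldl fAltMaxStep (a, b) (pvConsume 0 1 s)
      rw [consume_eq]
      simp [hz]
    · show List.foldl fAltMaxStep (a, b) (pvConsume 0 1 (u :: s)) = _
      rw [pvConsume, if_neg hu]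
      rw [List.foldl_cons, hz]
      rfl

theorem spec_fold (d : List Int) (a b : Int) :
    pvSpec d a b = (List.foldl fAltMaxStep (a, b) (pvGroups d)).1
      - (List.foldl fAltMaxStep (a, b) (pvGroups d)).2 := by
  fun_induction pvSpec d a b with
  | case1 a b => simp [pvGroups]
  | case2 v t a b hv ih =>
    rw [ih]
    show _ = (List.foldl fAltMaxStep (a, b) (pvConsume v 1 t)).1
      - (List.foldl fAltMaxStep (a, b) (pvConsume v 1 t)).2
    rw [consume_eq, List.foldl_cons]
    have hstep : fAltMaxStep (a, b) (v, 1 + (pvTW v t : Int))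
        = (max ((pvTW v t : Int) + 2) a, b) := by
      simp [fAltMaxStep, hv, Prod.ext_iff]
      omega
    rw [hstep]
  | case3 v t a b hv hv' ih =>
    rw [ih]
    show _ = (List.foldl fAltMaxStep (a, b) (pvConsume v 1 t)).1
      - (List.foldl fAltMaxStep (a, b) (pvConsume v 1 t)).2
    rw [consume_eq, List.foldl_cons]
    have hstep : fAltMaxStep (a, b) (v, 1 + (pvTW v t : Int))
        = (a, max ((pvTW v t : Int) + 2) b) := by
      simp [fAltMaxStep, hv, hv', Prod.ext_iff]
      omega
    rw [hstep]
  | case4 v t a b hv hv' ih =>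
    have hv0 : v = 0 := by omega
    subst hv0
    rw [ih, fold_groups_zero]

-- ===== VERDICT (by name: the statement is the Claim_ definition above) =====
theorem f_spec : Claim_equal_f := by
  intro A _
  unfold Spec_f
  show fOuter A A.length 1 0 0 = f_alt A
  have h1 : fOuter A A.length (0 + 1) 0 0 = pvSpec ((pvDiffs A).drop 0) 0 0 :=
    outer_spec A A.length 0 0 0 (by omega)
  simp only [Nat.zero_add, List.drop_zero] at h1
  rw [h1, spec_fold]
  simp only [f_alt]
  rw [foldl_groups]
  rfl
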